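-- pv_equiv track=rewrite | github.com/juwkim/boj | 백준/Silver/18124. 치삼이의 종이 자르기/치삼이의 종이 자르기.py | solve
-- ===== SOURCE A (Python) =====
-- def solve(N):
--     l = 1
--     ans = 0
--     while N > 2 * l:
--         ans += l
--         l <<= 1
--     if N > l:
--         ans += (N + 1) // 2
--     return ans
-- ===== SOURCE B (Python) =====
-- def solve(N):
--     if N <= 1:
--         return 0
--     k = (N - 1).bit_length() - 1
--     return (1 << k) - 1 + (N + 1) // 2
-- ===== Notes on version B (the rewrite author's own statement) =====
-- stated objective: alternative
-- what changed: Replaced the doubling while-loop (sum of powers of two) with a closed form: the accumulated sum is 2^k - 1 where k = (N-1).bit_length() - 1, plus the final (N+1)//2 adjustment; O(1) with no loop.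
import Mathlib
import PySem

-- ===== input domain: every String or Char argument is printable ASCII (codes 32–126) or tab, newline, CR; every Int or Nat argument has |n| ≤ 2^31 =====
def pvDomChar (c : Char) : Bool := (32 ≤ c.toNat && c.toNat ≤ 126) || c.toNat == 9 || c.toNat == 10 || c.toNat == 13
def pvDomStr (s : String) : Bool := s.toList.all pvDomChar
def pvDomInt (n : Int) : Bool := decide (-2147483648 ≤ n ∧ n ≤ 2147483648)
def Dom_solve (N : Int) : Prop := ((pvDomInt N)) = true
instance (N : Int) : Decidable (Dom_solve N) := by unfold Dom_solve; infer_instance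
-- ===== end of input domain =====

-- B replaces A's doubling while-loop with a closed form from the bit length of N-1 (alternative, O(1)).

-- ===== PORT A =====
-- A's while loop; the '1 ≤ l' conjunct only makes the recursion well-founded
-- (A always starts it with l = 1 and doubling preserves 1 ≤ l), it changes no admitted run.
def solveLoop (N l ans : Int) : Int × Int :=
  if _h : 2 * l < N ∧ 1 ≤ l then solveLoop N (2 * l) (ans + l) else (l, ans)
termination_by (N - l).toNat
decreasing_by omega

def solve (N : Int) : Int :=
  let p := solveLoop N 1 0
  if p.1 < N then p.2 + PySem.Int.floordiv (N + 1) 2 else p.2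

-- ===== PORT B =====
-- Python's (N-1).bit_length() is Nat.size of (N-1).toNat (B only uses it when N ≥ 2, so N-1 ≥ 1)
def solve_alt (N : Int) : Int :=
  if N ≤ 1 then 0
  else
    let k : Nat := Nat.size (N - 1).toNat - 1
    (2 : Int) ^ k - 1 + PySem.Int.floordiv (N + 1) 2

-- ===== PRECONDITION & SPEC =====
def Spec_solve (N : Int) (out : Int) : Prop := out = solve_alt N
instance (N : Int) (out : Int) : Decidable (Spec_solve N out) := by unfold Spec_solve; infer_instance

-- ===== CLAIM (what is proved, stated in full; the proofs are below) =====
def Claim_equal_solve : Prop := ∀ (N : Int), Dom_solve N → Spec_solve N (solve N)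

-- ===== LEMMAS AND PROOFS =====

lemma solveLoop_eq (k : Nat) : ∀ (N l ans : Int), 1 ≤ l → (2:Int) ^ k * l < N →
    N ≤ (2:Int) ^ (k + 1) * l → solveLoop N l ans = ((2:Int) ^ k * l, ans + ((2:Int) ^ k - 1) * l) := by
  induction k with
  | zero =>
    intro N l ans hl h1 h2
    rw [solveLoop]
    simp only [pow_zero, one_mul] at *
    have hng : ¬ (2 * l < N ∧ 1 ≤ l) := by omega
    rw [dif_neg hng]
    simp only [Prod.mk.injEq]
    exact ⟨trivial, by ring⟩
  | succ k ih =>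
    intro N l ans hl h1 h2
    have hp : (0:Int) < 2 ^ k := pow_pos (by norm_num) k
    have hstep : 2 * l < N := by nlinarith [pow_succ (2:Int) k]
    rw [solveLoop]
    have hg : 2 * l < N ∧ 1 ≤ l := ⟨hstep, hl⟩
    rw [dif_pos hg]
    have h1' : (2:Int) ^ k * (2 * l) < N := by rw [pow_succ] at h1; linarith [h1]
    have h2' : N ≤ (2:Int) ^ (k + 1) * (2 * l) := by
      rw [show (2:Int) ^ (k + 1) * (2 * l) = 2 ^ (k + 1 + 1) * l by rw [pow_succ]; ring]
      exact h2
    rw [ih N (2 * l) (ans + l) (by omega) h1' h2']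
    simp only [Prod.mk.injEq]
    constructor <;> (rw [pow_succ]; ring)

lemma solve_eq_alt (N : Int) : solve N = solve_alt N := by
  by_cases hN : N ≤ 1
  · unfold solve
    rw [solveLoop]
    have hng : ¬ (2 * 1 < N ∧ 1 ≤ (1:Int)) := by omega
    rw [dif_neg hng]
    simp only [solve_alt, if_pos hN]
    have : ¬ ((1:Int) < N) := by omega
    simp [this]
  · push Not at hN
    set m : Nat := (N - 1).toNat with hm
    have hmN : (m : Int) = N - 1 := by omega
    have hm1 : 1 ≤ m := by omega
    have hs : 0 < Nat.size m := Nat.size_pos.mpr hm1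
    set k : Nat := Nat.size m - 1 with hk
    have hks : k + 1 = Nat.size m := by omega
    have hlow : 2 ^ k ≤ m := Nat.lt_size.mp (by omega)
    have hhigh : m < 2 ^ (k + 1) := by rw [hks]; exact Nat.lt_size_self m
    have hlowI : (2:Int) ^ k * 1 < N := by
      have : ((2 ^ k : Nat) : Int) ≤ (m : Int) := by exact_mod_cast hlow
      push_cast at this; omega
    have hhighI : N ≤ (2:Int) ^ (k + 1) * 1 := by
      have : (m : Int) < ((2 ^ (k + 1) : Nat) : Int) := by exact_mod_cast hhigh
      push_cast at this; omega
    unfold solve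
    rw [solveLoop_eq k N 1 0 (by norm_num) hlowI hhighI]
    have hlt : (2:Int) ^ k * 1 < N := hlowI
    simp only [hlt, if_pos]
    unfold solve_alt
    rw [if_neg (by omega)]
    rw [← hm, ← hk]
    ring

-- ===== VERDICT (by name: the statement is the Claim_ definition above) =====
theorem solve_spec : Claim_equal_solve := by
  intro N _
  unfold Spec_solve
  exact solve_eq_alt N
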